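-- pv_equiv track=rewrite | github.com/ATPs/xiaolongTools | WenlinTools.Python3/python_lib/Bong/evdblib/Utils/Parsers/PDBMappingTools.py | get_equivalent_positions
-- ===== SOURCE A (Python) =====
-- def get_equivalent_positions( seq1, seq2 ) :
-- 	'''
-- 	returns indices for the common positions in seq1 and seq2
-- 	relative to themelves.
-- 	'''
-- 	eq1, eq2 = [], []
-- 	i, j = -1, -1
-- 	for a, b in zip( seq1, seq2 ) :
-- 		if a.isalpha() :
-- 			i += 1
-- 		if b.isalpha() :
-- 			j += 1
--
-- 		if a.isalpha() and b.isalpha() :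
-- 			eq1.append(i)
-- 			eq2.append(j)
--
-- 	return [eq1, eq2]
-- ===== SOURCE B (Python) =====
-- def _prefix_ranks(flags):
--     # running 0-based alpha rank at each aligned position (-1 before any alpha)
--     out = []
--     c = -1
--     for f in flags:
--         if f:
--             c += 1
--         out.append(c)
--     return out
--
-- def get_equivalent_positions(seq1, seq2):
--     '''
--     returns indices for the common positions in seq1 and seq2
--     relative to themelves.
--     '''
--     pairs = list(zip(seq1, seq2))
--     flags1 = [a.isalpha() for a, b in pairs]
--     flags2 = [b.isalpha() for a, b in pairs]
--     ranks1 = _prefix_ranks(flags1)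
--     ranks2 = _prefix_ranks(flags2)
--     eq1 = [r for r, (f1, f2) in zip(ranks1, zip(flags1, flags2)) if f1 and f2]
--     eq2 = [r for r, (f1, f2) in zip(ranks2, zip(flags1, flags2)) if f1 and f2]
--     return [eq1, eq2]
-- ===== Notes on version B (the rewrite author's own statement) =====
-- stated objective: alternative
-- what changed: Replaced A's single stateful loop (two running counters updated while filtering) by a phase-separated pipeline: precompute per-position alpha-rank prefix sequences over the zipped region, then a separate zip/filter pass selects the ranks at positions where both aligned characters are alphabetic.
import Mathlib
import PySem

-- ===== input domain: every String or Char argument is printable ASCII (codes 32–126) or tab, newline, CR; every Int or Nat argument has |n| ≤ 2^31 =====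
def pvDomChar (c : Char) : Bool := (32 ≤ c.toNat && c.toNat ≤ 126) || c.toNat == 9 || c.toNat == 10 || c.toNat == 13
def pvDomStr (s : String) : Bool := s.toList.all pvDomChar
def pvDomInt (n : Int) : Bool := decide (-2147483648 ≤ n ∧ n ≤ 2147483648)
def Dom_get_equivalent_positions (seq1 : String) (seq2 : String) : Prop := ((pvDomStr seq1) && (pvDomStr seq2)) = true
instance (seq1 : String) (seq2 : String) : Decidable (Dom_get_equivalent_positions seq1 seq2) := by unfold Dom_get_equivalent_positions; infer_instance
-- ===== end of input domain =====

-- B replaces A's single stateful loop by precomputed prefix-rank sequences plus a zip/filter pass (alternative decomposition, same cost).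

-- ===== PORT A =====
-- one fold over zip(seq1,seq2), state (i, j, eq1, eq2), exactly A's loop body
def get_equivalent_positions (seq1 : String) (seq2 : String) : List (List Int) :=
  let st :=
    (List.zip seq1.toList seq2.toList).foldl
      (fun (st : Int × Int × List Int × List Int) ab =>
        let i := if PySem.Chars.isalpha ab.1 then st.1 + 1 else st.1
        let j := if PySem.Chars.isalpha ab.2 then st.2.1 + 1 else st.2.1
        if PySem.Chars.isalpha ab.1 && PySem.Chars.isalpha ab.2 then
          (i, j, st.2.2.1 ++ [i], st.2.2.2 ++ [j])
        else
          (i, j, st.2.2.1, st.2.2.2))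
      (-1, -1, [], [])
  [st.2.2.1, st.2.2.2]

-- ===== PORT B =====
-- Source B's _prefix_ranks: loop with running counter c starting at -1, appending c each step
def prefix_ranks (flags : List Bool) : List Int :=
  (flags.foldl
    (fun (st : List Int × Int) f =>
      let c := if f then st.2 + 1 else st.2
      (st.1 ++ [c], c))
    ([], -1)).1

def get_equivalent_positions_alt (seq1 : String) (seq2 : String) : List (List Int) :=
  let pairs := List.zip seq1.toList seq2.toList
  let flags1 := pairs.map (fun p => PySem.Chars.isalpha p.1)
  let flags2 := pairs.map (fun p => PySem.Chars.isalpha p.2)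
  let ranks1 := prefix_ranks flags1
  let ranks2 := prefix_ranks flags2
  let eq1 := ((ranks1.zip (flags1.zip flags2)).filter (fun t => t.2.1 && t.2.2)).map (·.1)
  let eq2 := ((ranks2.zip (flags1.zip flags2)).filter (fun t => t.2.1 && t.2.2)).map (·.1)
  [eq1, eq2]

-- ===== PRECONDITION & SPEC =====
def Spec_get_equivalent_positions (seq1 : String) (seq2 : String) (out : List (List Int)) : Prop := out = get_equivalent_positions_alt seq1 seq2
instance (seq1 : String) (seq2 : String) (out : List (List Int)) : Decidable (Spec_get_equivalent_positions seq1 seq2 out) := by unfold Spec_get_equivalent_positions; infer_instance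

-- ===== CLAIM (what is proved, stated in full; the proofs are below) =====
def Claim_equal_get_equivalent_positions : Prop := ∀ (seq1 : String) (seq2 : String), Dom_get_equivalent_positions seq1 seq2 → Spec_get_equivalent_positions seq1 seq2 (get_equivalent_positions seq1 seq2)

-- ===== LEMMAS AND PROOFS =====

-- structural prefix ranks starting from c (proof-side reference for prefix_ranks)
def pfx (c : Int) : List Bool → List Int
  | [] => []
  | f :: fs => (if f then c + 1 else c) :: pfx (if f then c + 1 else c) fs

lemma prefix_ranks_foldl (flags : List Bool) (acc : List Int) (c : Int) :
    (flags.foldl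
      (fun (st : List Int × Int) f =>
        let c := if f then st.2 + 1 else st.2
        (st.1 ++ [c], c)) (acc, c)) =
    (acc ++ pfx c flags, c + (flags.countP id : Int)) := by
  induction flags generalizing acc c with
  | nil => simp [pfx]
  | cons f fs ih =>
    simp only [List.foldl_cons, pfx, ih, List.countP_cons]
    cases f <;> simp <;> omega

lemma prefix_ranks_eq (flags : List Bool) : prefix_ranks flags = pfx (-1) flags := by
  simp [prefix_ranks, prefix_ranks_foldl]

-- reference result: selected ranks (counted via sel-side character) over pair list l, counter starting at i
def esp (sel : Char × Char → Char) (i : Int) : List (Char × Char) → List Int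
  | [] => []
  | p :: l =>
    let i' := if PySem.Chars.isalpha (sel p) then i + 1 else i
    if PySem.Chars.isalpha p.1 && PySem.Chars.isalpha p.2 then i' :: esp sel i' l
    else esp sel i' l

lemma foldA_eq (l : List (Char × Char)) (i j : Int) (e1 e2 : List Int) :
    l.foldl
      (fun (st : Int × Int × List Int × List Int) ab =>
        let i := if PySem.Chars.isalpha ab.1 then st.1 + 1 else st.1
        let j := if PySem.Chars.isalpha ab.2 then st.2.1 + 1 else st.2.1
        if PySem.Chars.isalpha ab.1 && PySem.Chars.isalpha ab.2 then
          (i, j, st.2.2.1 ++ [i], st.2.2.2 ++ [j])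
        else
          (i, j, st.2.2.1, st.2.2.2))
      (i, j, e1, e2) =
    (i + (l.countP (fun p => PySem.Chars.isalpha p.1) : Int),
     j + (l.countP (fun p => PySem.Chars.isalpha p.2) : Int),
     e1 ++ esp Prod.fst i l, e2 ++ esp Prod.snd j l) := by
  induction l generalizing i j e1 e2 with
  | nil => simp [esp]
  | cons p l ih =>
    rw [List.foldl_cons, ih]
    simp only [esp, List.countP_cons]
    by_cases h1 : PySem.Chars.isalpha p.1 <;> by_cases h2 : PySem.Chars.isalpha p.2 <;>
      simp [h1, h2, Prod.ext_iff] <;> omega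

lemma filter_zip_eq (sel : Char × Char → Char)
    (hsel : sel = Prod.fst ∨ sel = Prod.snd)
    (l : List (Char × Char)) (i : Int) :
    ((((pfx i (l.map (fun p => PySem.Chars.isalpha (sel p)))).zip
        ((l.map (fun p => PySem.Chars.isalpha p.1)).zip
         (l.map (fun p => PySem.Chars.isalpha p.2)))).filter
        (fun t => t.2.1 && t.2.2)).map (·.1)) = esp sel i l := by
  induction l generalizing i with
  | nil => simp [pfx, esp]
  | cons p l ih =>
    simp only [List.map_cons, pfx, List.zip_cons_cons, esp]
    by_cases h1 : PySem.Chars.isalpha p.1 <;> by_cases h2 : PySem.Chars.isalpha p.2 <;>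
      rcases hsel with rfl | rfl <;>
      simp [h1, h2, ih]

-- ===== VERDICT (by name: the statement is the Claim_ definition above) =====
theorem get_equivalent_positions_spec : Claim_equal_get_equivalent_positions := by
  intro seq1 seq2 _
  unfold Spec_get_equivalent_positions get_equivalent_positions get_equivalent_positions_alt
  simp only [prefix_ranks_eq, foldA_eq,
    filter_zip_eq Prod.fst (Or.inl rfl), filter_zip_eq Prod.snd (Or.inr rfl)]
  simp
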